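-- pv_equiv track=rewrite | github.com/map-lo/DrumEngine01 | src/preset-from-tci/analyze_tci_results.py | build_derived_hists
-- ===== SOURCE A (Python) =====
-- from collections import Counter, defaultdict
--
-- def build_derived_hists(rows):
--     zlib_from_end = Counter()
--     zlib_mod_4096 = Counter()
--     blob_from_end = Counter()
--     total_compressed_bytes = Counter()
--     xml_data_count = Counter()
--     xml_sample_rate = Counter()
--     for row in rows:
--         size = row.get("size")
--         zlib_xml = row.get("zlib_xml")
--         blob_end = row.get("blob_from_end")
--         total_bytes = row.get("total_compressed_bytes")
--         data_count = row.get("xml_data_count")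
--         xml_sr = row.get("xml_sample_rate")
--         if size is not None and zlib_xml is not None:
--             zlib_from_end[size - zlib_xml] += 1
--             zlib_mod_4096[zlib_xml % 4096] += 1
--         if blob_end is not None:
--             blob_from_end[blob_end] += 1
--         if total_bytes is not None:
--             total_compressed_bytes[total_bytes] += 1
--         if data_count is not None:
--             xml_data_count[data_count] += 1
--         if xml_sr is not None:
--             xml_sample_rate[xml_sr] += 1
--     return {
--         "zlib_from_end": dict(zlib_from_end.most_common()),
--         "zlib_mod_4096": dict(zlib_mod_4096.most_common()),
--         "blob_from_end": dict(blob_from_end.most_common()),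
--         "total_compressed_bytes": dict(total_compressed_bytes.most_common()),
--         "xml_data_count": dict(xml_data_count.most_common()),
--         "xml_sample_rate": dict(xml_sample_rate.most_common()),
--     }
-- ===== SOURCE B (Python) =====
-- from collections import Counter
--
-- def build_derived_hists(rows):
--     rows = list(rows)
--
--     def hist(values):
--         return dict(Counter(values).most_common())
--
--     def col(key):
--         return [v for r in rows if (v := r.get(key)) is not None]
--
--     pairs = [(s, z) for r in rows
--              for s, z in [(r.get("size"), r.get("zlib_xml"))]
--              if s is not None and z is not None]
--     return {
--         "zlib_from_end": hist(s - z for s, z in pairs),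
--         "zlib_mod_4096": hist(z % 4096 for s, z in pairs),
--         "blob_from_end": hist(col("blob_from_end")),
--         "total_compressed_bytes": hist(col("total_compressed_bytes")),
--         "xml_data_count": hist(col("xml_data_count")),
--         "xml_sample_rate": hist(col("xml_sample_rate")),
--     }
-- ===== Notes on version B (the rewrite author's own statement) =====
-- stated objective: simpler
-- what changed: Replaced the single guarded pass that threads six Counters through one loop by six independent passes: each histogram is built on its own by a small hist() helper (dict(Counter(values).most_common())) applied to a filtered column extracted from the materialized rows.
import Mathlib
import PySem

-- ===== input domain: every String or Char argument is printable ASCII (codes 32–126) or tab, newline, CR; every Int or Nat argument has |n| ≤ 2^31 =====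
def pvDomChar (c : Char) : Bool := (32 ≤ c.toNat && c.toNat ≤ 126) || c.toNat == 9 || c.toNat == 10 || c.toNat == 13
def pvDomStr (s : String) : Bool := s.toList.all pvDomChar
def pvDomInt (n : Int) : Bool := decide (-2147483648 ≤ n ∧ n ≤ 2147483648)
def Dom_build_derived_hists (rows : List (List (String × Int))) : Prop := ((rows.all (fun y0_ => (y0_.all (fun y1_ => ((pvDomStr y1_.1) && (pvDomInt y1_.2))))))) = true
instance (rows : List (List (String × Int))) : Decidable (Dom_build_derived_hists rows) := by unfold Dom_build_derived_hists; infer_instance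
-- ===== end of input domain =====

-- B builds each histogram in its own filtered pass instead of threading six Counters
-- through one guarded loop (objective: simpler decomposition, same cost).

-- ===== PORT A =====
-- dict(c.most_common()) : sort items by count, Python reverse rule (stable), then dict()
def pvMostCommonDict (c : PySem.Dict Int Int) : List (Int × Int) :=
  (PySem.Dict.ofList (PySem.List.sorted c.items (fun p => p.2) true)).items

-- the body of A's for-loop, acting on the six Counters
def pvStepA (st : PySem.Dict Int Int × PySem.Dict Int Int × PySem.Dict Int Int ×
                  PySem.Dict Int Int × PySem.Dict Int Int × PySem.Dict Int Int)
    (row : List (String × Int)) :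
    PySem.Dict Int Int × PySem.Dict Int Int × PySem.Dict Int Int ×
    PySem.Dict Int Int × PySem.Dict Int Int × PySem.Dict Int Int :=
  match st with
  | (c1, c2, c3, c4, c5, c6) =>
    let size := row.lookup "size"
    let zlib_xml := row.lookup "zlib_xml"
    let blob_end := row.lookup "blob_from_end"
    let total_bytes := row.lookup "total_compressed_bytes"
    let data_count := row.lookup "xml_data_count"
    let xml_sr := row.lookup "xml_sample_rate"
    let c12 := match size, zlib_xml with
      | some s, some z => (c1.modify (s - z) 0 (· + 1), c2.modify (PySem.Int.mod z 4096) 0 (· + 1))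
      | _, _ => (c1, c2)
    let c3 := match blob_end with | some b => c3.modify b 0 (· + 1) | none => c3
    let c4 := match total_bytes with | some t => c4.modify t 0 (· + 1) | none => c4
    let c5 := match data_count with | some d => c5.modify d 0 (· + 1) | none => c5
    let c6 := match xml_sr with | some x => c6.modify x 0 (· + 1) | none => c6
    (c12.1, c12.2, c3, c4, c5, c6)

def build_derived_hists (rows : List (List (String × Int))) : List (String × List (Int × Int)) :=
  match rows.foldl pvStepA
      (PySem.Dict.empty, PySem.Dict.empty, PySem.Dict.empty,
       PySem.Dict.empty, PySem.Dict.empty, PySem.Dict.empty) with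
  | (c1, c2, c3, c4, c5, c6) =>
    [("zlib_from_end", pvMostCommonDict c1),
     ("zlib_mod_4096", pvMostCommonDict c2),
     ("blob_from_end", pvMostCommonDict c3),
     ("total_compressed_bytes", pvMostCommonDict c4),
     ("xml_data_count", pvMostCommonDict c5),
     ("xml_sample_rate", pvMostCommonDict c6)]

-- ===== PORT B =====
-- hist(values) = dict(Counter(values).most_common())
def pvHist (values : List Int) : List (Int × Int) :=
  (PySem.Dict.ofList (PySem.List.sorted (PySem.Dict.counter values).items (fun p => p.2) true)).items

-- col(key) = the key's values over rows, where present
def pvColB (rows : List (List (String × Int))) (key : String) : List Int :=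
  rows.filterMap (fun r => r.lookup key)

-- pairs = [(size, zlib_xml)] where both present
def pvPairsB (rows : List (List (String × Int))) : List (Int × Int) :=
  rows.filterMap (fun r =>
    match r.lookup "size", r.lookup "zlib_xml" with
    | some s, some z => some (s, z)
    | _, _ => none)

def build_derived_hists_alt (rows : List (List (String × Int))) : List (String × List (Int × Int)) :=
  let pairs := pvPairsB rows
  [("zlib_from_end", pvHist (pairs.map (fun p => p.1 - p.2))),
   ("zlib_mod_4096", pvHist (pairs.map (fun p => PySem.Int.mod p.2 4096))),
   ("blob_from_end", pvHist (pvColB rows "blob_from_end")),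
   ("total_compressed_bytes", pvHist (pvColB rows "total_compressed_bytes")),
   ("xml_data_count", pvHist (pvColB rows "xml_data_count")),
   ("xml_sample_rate", pvHist (pvColB rows "xml_sample_rate"))]

-- ===== PRECONDITION & SPEC =====
def Spec_build_derived_hists (rows : List (List (String × Int))) (out : List (String × List (Int × Int))) : Prop := out = build_derived_hists_alt rows
instance (rows : List (List (String × Int))) (out : List (String × List (Int × Int))) : Decidable (Spec_build_derived_hists rows out) := by unfold Spec_build_derived_hists; infer_instance

-- ===== CLAIM (what is proved, stated in full; the proofs are below) =====
def Claim_equal_build_derived_hists : Prop := ∀ (rows : List (List (String × Int))), Dom_build_derived_hists rows → Spec_build_derived_hists rows (build_derived_hists rows)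

-- ===== LEMMAS AND PROOFS =====
def pvCnt (l : List Int) (d : PySem.Dict Int Int) : PySem.Dict Int Int :=
  l.foldl (fun d x => d.modify x 0 (· + 1)) d

lemma pv_fold_eq (rows : List (List (String × Int))) :
    ∀ c1 c2 c3 c4 c5 c6 : PySem.Dict Int Int,
    rows.foldl pvStepA (c1, c2, c3, c4, c5, c6) =
      (pvCnt ((pvPairsB rows).map (fun p => p.1 - p.2)) c1,
       pvCnt ((pvPairsB rows).map (fun p => PySem.Int.mod p.2 4096)) c2,
       pvCnt (pvColB rows "blob_from_end") c3,
       pvCnt (pvColB rows "total_compressed_bytes") c4,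
       pvCnt (pvColB rows "xml_data_count") c5,
       pvCnt (pvColB rows "xml_sample_rate") c6) := by
  induction rows with
  | nil => intro c1 c2 c3 c4 c5 c6; simp [pvPairsB, pvColB, pvCnt]
  | cons row rest ih =>
    intro c1 c2 c3 c4 c5 c6
    simp only [List.foldl_cons, pvPairsB, pvColB, List.filterMap_cons]
    cases h1 : row.lookup "size" <;> cases h2 : row.lookup "zlib_xml" <;>
      cases h3 : row.lookup "blob_from_end" <;> cases h4 : row.lookup "total_compressed_bytes" <;>
      cases h5 : row.lookup "xml_data_count" <;> cases h6 : row.lookup "xml_sample_rate" <;>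
      simp only [pvStepA, h1, h2, h3, h4, h5, h6, ih, pvPairsB, pvColB, pvCnt,
        List.map_cons, List.foldl_cons]

lemma pv_counter_eq (l : List Int) : PySem.Dict.counter l = pvCnt l PySem.Dict.empty := rfl

-- ===== VERDICT (by name: the statement is the Claim_ definition above) =====
theorem build_derived_hists_spec : Claim_equal_build_derived_hists := by
  intro rows _
  unfold Spec_build_derived_hists build_derived_hists build_derived_hists_alt
  rw [pv_fold_eq]
  simp only [pvHist, pvMostCommonDict, pv_counter_eq]
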